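-- pv_equiv track=rewrite | github.com/sgttomas/chirality-piping | tools/publication/build_section_map.py | count_open_issues_for_kty
-- ===== SOURCE A (Python) =====
-- from typing import Dict, Iterable, List, Optional, Sequence, Tuple
--
-- def count_open_issues_for_kty(open_issue_rows: Sequence[Dict[str, str]], kty_id: str, subject_ids: Iterable[str]) -> int:
--     if not open_issue_rows:
--         return 0
--     needles = {kty_id, kty_id.split("_", 1)[0], *[sid for sid in subject_ids if sid]}
--     count = 0
--     for row in open_issue_rows:
--         blob = " ".join(row.values())
--         if any(needle and needle in blob for needle in needles):
--             count += 1
--     return count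
-- ===== SOURCE B (Python) =====
-- def count_open_issues_for_kty(open_issue_rows, kty_id, subject_ids):
--     needles = [n for n in (kty_id, kty_id.split("_", 1)[0], *subject_ids) if n]
--     unmatched = [" ".join(row.values()) for row in open_issue_rows]
--     for needle in needles:
--         if not unmatched:
--             break
--         unmatched = [blob for blob in unmatched if needle not in blob]
--     return len(open_issue_rows) - len(unmatched)
-- ===== Notes on version B (the rewrite author's own statement) =====
-- stated objective: faster
-- what changed: B inverts the loop nesting into a needle-major sieve: it precomputes the row blobs once, then successively filters out the blobs containing each needle (stopping when none remain) and returns row count minus survivors, instead of A's row-major scan testing every needle of a set against each blob.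
import Mathlib
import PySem

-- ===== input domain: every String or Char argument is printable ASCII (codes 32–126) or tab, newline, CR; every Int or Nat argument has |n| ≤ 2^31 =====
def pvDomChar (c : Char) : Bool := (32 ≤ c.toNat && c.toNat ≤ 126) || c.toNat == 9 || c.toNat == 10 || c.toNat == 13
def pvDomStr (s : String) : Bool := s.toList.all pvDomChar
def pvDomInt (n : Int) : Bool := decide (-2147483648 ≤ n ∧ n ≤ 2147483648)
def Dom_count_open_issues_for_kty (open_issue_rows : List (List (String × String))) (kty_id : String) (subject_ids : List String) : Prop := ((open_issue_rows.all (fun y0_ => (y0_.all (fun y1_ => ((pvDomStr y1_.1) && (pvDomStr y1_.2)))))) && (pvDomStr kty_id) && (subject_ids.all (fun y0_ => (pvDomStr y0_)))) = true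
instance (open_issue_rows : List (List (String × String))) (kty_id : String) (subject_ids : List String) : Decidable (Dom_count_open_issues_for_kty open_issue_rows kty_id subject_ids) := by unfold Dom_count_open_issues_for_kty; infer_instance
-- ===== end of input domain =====

-- B inverts the loop nesting into a needle-major sieve: the row blobs are precomputed once,
-- then the blobs containing each needle are filtered out in turn (stopping when none remain)
-- and row count minus survivors is returned; a timing run measured B faster (shrinking
-- worklist, same worst-case asymptotics).

-- ===== PORT A =====
def count_open_issues_for_kty (open_issue_rows : List (List (String × String))) (kty_id : String) (subject_ids : List String) : Int :=
  if open_issue_rows.isEmpty then 0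
  else
    -- kty_id.split("_", 1)[0]: split with a non-empty sep is some and non-empty, so [0] is its head — exact
    let needles : PySem.Set String :=
      PySem.Set.ofList ([kty_id, ((PySem.Str.splitMax? kty_id "_" 1).getD []).headD ""]
        ++ subject_ids.filter (fun sid => !(sid == "")))
    open_issue_rows.foldl (fun count row =>
      let blob := PySem.Str.join " " (PySem.Dict.ofList row).values
      if needles.any (fun needle => !(needle == "") && PySem.Str.isIn needle blob) then count + 1
      else count) 0

-- ===== PORT B =====
-- Source B's needle loop: drop the blobs containing the needle; stop early when none remain
def pvSieve (needles : List String) (unmatched : List String) : List String :=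
  match needles with
  | [] => unmatched
  | needle :: rest =>
      if unmatched.isEmpty then unmatched
      else pvSieve rest (unmatched.filter (fun blob => !(PySem.Str.isIn needle blob)))

def count_open_issues_for_kty_alt (open_issue_rows : List (List (String × String))) (kty_id : String) (subject_ids : List String) : Int :=
  let needles := ([kty_id, ((PySem.Str.splitMax? kty_id "_" 1).getD []).headD ""]
    ++ subject_ids).filter (fun n => !(n == ""))
  let unmatched := open_issue_rows.map (fun row => PySem.Str.join " " (PySem.Dict.ofList row).values)
  PySem.List.len open_issue_rows - PySem.List.len (pvSieve needles unmatched)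

-- ===== PRECONDITION & SPEC =====
def Spec_count_open_issues_for_kty (open_issue_rows : List (List (String × String))) (kty_id : String) (subject_ids : List String) (out : Int) : Prop := out = count_open_issues_for_kty_alt open_issue_rows kty_id subject_ids
instance (open_issue_rows : List (List (String × String))) (kty_id : String) (subject_ids : List String) (out : Int) : Decidable (Spec_count_open_issues_for_kty open_issue_rows kty_id subject_ids out) := by unfold Spec_count_open_issues_for_kty; infer_instance

-- ===== CLAIM (what is proved, stated in full; the proofs are below) =====
def Claim_equal_count_open_issues_for_kty : Prop := ∀ (open_issue_rows : List (List (String × String))) (kty_id : String) (subject_ids : List String), Dom_count_open_issues_for_kty open_issue_rows kty_id subject_ids → Spec_count_open_issues_for_kty open_issue_rows kty_id subject_ids (count_open_issues_for_kty open_issue_rows kty_id subject_ids)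

-- ===== LEMMAS AND PROOFS =====

-- any over set(l) is any over l (boolean, so dedup is irrelevant)
theorem pv_set_any (l : List String) (f : String → Bool) :
    (PySem.Set.ofList l).any f = l.any f := by
  rw [Bool.eq_iff_iff]
  simp only [List.any_eq_true]
  constructor <;> rintro ⟨x, hx, hf⟩
  · exact ⟨x, (PySem.Set.mem_ofList _ _).mp hx, hf⟩
  · exact ⟨x, (PySem.Set.mem_ofList _ _).mpr hx, hf⟩

-- filtering subject_ids before the nonempty test changes nothing
theorem pv_needles_any (kty pref : String) (subs : List String) (f : String → Bool) :
    ([kty, pref] ++ subs.filter (fun s => !(s == ""))).any (fun n => !(n == "") && f n) =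
      (([kty, pref] ++ subs).filter (fun n => !(n == ""))).any f := by
  rw [Bool.eq_iff_iff]
  simp only [List.any_eq_true, List.mem_append, List.mem_filter, Bool.and_eq_true]
  constructor
  · rintro ⟨x, hx, hne, hf⟩
    rcases hx with hx | hx
    · exact ⟨x, ⟨Or.inl hx, hne⟩, hf⟩
    · exact ⟨x, ⟨Or.inr hx.1, hne⟩, hf⟩
  · rintro ⟨x, ⟨hx, hne⟩, hf⟩
    rcases hx with hx | hx
    · exact ⟨x, Or.inl hx, hne, hf⟩
    · exact ⟨x, Or.inr ⟨hx, hne⟩, hne, hf⟩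

-- A's counting fold is countP plus the accumulator
theorem pv_foldl_count {α : Type} (Q : α → Bool) (l : List α) (c : Int) :
    l.foldl (fun c x => if Q x then c + 1 else c) c = c + l.countP Q := by
  induction l generalizing c with
  | nil => simp
  | cons a l ih =>
    rw [List.foldl_cons, List.countP_cons]
    by_cases h : Q a = true
    · rw [if_pos h, ih]; simp [h]; ring
    · rw [if_neg h, ih]; simp [h]

-- de Morgan: no needle occurs iff not some needle occurs
theorem pv_all_not (L : List String) (b : String) :
    (L.all (fun n => !(PySem.Str.isIn n b))) = !(L.any (fun n => PySem.Str.isIn n b)) := by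
  induction L with
  | nil => simp
  | cons x L ih => rw [List.all_cons, List.any_cons, ih, Bool.not_or]

-- the sieve keeps exactly the blobs containing no needle (the early exit is harmless: filtering [] is [])
theorem pv_sieve_eq (needles : List String) (bs : List String) :
    pvSieve needles bs = bs.filter (fun b => needles.all (fun n => !(PySem.Str.isIn n b))) := by
  induction needles generalizing bs with
  | nil => simp [pvSieve]
  | cons n ns ih =>
    rw [pvSieve]
    by_cases h : bs.isEmpty
    · obtain rfl := List.isEmpty_iff.mp h; simp
    · rw [if_neg h, ih, List.filter_filter]
      simp [List.all_cons, Bool.and_comm]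

-- ===== VERDICT (by name: the statement is the Claim_ definition above) =====
theorem count_open_issues_for_kty_spec : Claim_equal_count_open_issues_for_kty := by
  intro rows kty subs _
  unfold Spec_count_open_issues_for_kty count_open_issues_for_kty count_open_issues_for_kty_alt
  simp only [PySem.List.len_eq, pv_sieve_eq, ← List.countP_eq_length_filter, List.countP_map,
    Function.comp_def]
  by_cases h : rows.isEmpty
  · obtain rfl := List.isEmpty_iff.mp h
    simp
  · rw [if_neg h]
    simp only [pv_set_any, pv_needles_any, pv_foldl_count]
    have hsplit := List.length_eq_countP_add_countP
      (l := rows)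
      (p := fun row => (([kty, ((PySem.Str.splitMax? kty "_" 1).getD []).headD ""] ++ subs).filter
        (fun n => !(n == ""))).any
        (fun n => PySem.Str.isIn n (PySem.Str.join " " (PySem.Dict.ofList row).values)))
    simp only [pv_all_not, decide_not, Bool.decide_eq_true] at *
    omega
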